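-- pv_equiv track=rewrite | github.com/kalrakk/development | Python/chocolate.py | wrapper_choc
-- ===== SOURCE A (Python) =====
-- def wrapper_choc(n) :
--     if(n<3) :
--         return 0
--     elif(n<5) :
--         wrap_choc=int(n/3)
--         return wrap_choc+wrapper_choc(wrap_choc)
--     else :
--         wrap_choc=int(n/5)*2
--         return wrap_choc+wrapper_choc(wrap_choc+n%5)
-- ===== SOURCE B (Python) =====
-- def wrapper_choc(n):
--     # Closed form: the recursion totals to (2*n - 3) // 3 for n >= 3, else 0.
--     return 0 if n < 3 else (2 * n - 3) // 3
-- ===== Notes on version B (the rewrite author's own statement) =====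
-- stated objective: simpler
-- what changed: Replaced the recursion with its closed form: 0 for n < 3, (2*n-3)//3 otherwise.
import Mathlib
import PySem

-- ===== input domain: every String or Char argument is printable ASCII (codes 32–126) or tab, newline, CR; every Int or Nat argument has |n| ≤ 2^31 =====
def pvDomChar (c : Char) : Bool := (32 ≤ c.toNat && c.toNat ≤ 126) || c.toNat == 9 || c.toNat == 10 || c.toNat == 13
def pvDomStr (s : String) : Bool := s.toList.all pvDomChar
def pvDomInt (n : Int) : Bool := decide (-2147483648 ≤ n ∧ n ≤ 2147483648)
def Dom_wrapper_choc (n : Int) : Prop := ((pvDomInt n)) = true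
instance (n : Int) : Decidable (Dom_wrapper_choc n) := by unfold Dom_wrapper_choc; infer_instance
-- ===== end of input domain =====

-- B replaces A's recursion with its closed form: 0 for n < 3, (2*n-3)//3 otherwise (simpler).

-- ===== PORT A =====
-- int(n/k) is truncating division; in both recursive branches n > 0, where it equals floor division,
-- so it is ported as PySem.Int.floordiv (exact there).
def wrapper_choc (n : Int) : Int :=
  if n < 3 then 0
  else if n < 5 then
    let wrap_choc := PySem.Int.floordiv n 3
    wrap_choc + wrapper_choc wrap_choc
  else
    let wrap_choc := PySem.Int.floordiv n 5 * 2
    wrap_choc + wrapper_choc (wrap_choc + PySem.Int.mod n 5)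
termination_by n.toNat
decreasing_by
  · rw [PySem.Int.floordiv_eq_ediv_of_pos (by omega)]; omega
  · rw [PySem.Int.floordiv_eq_ediv_of_pos (by omega), PySem.Int.mod_eq_emod_of_pos (by omega)]
    omega

-- ===== PORT B =====
def wrapper_choc_alt (n : Int) : Int :=
  if n < 3 then 0 else PySem.Int.floordiv (2 * n - 3) 3

-- ===== PRECONDITION & SPEC =====
def Spec_wrapper_choc (n : Int) (out : Int) : Prop := out = wrapper_choc_alt n
instance (n : Int) (out : Int) : Decidable (Spec_wrapper_choc n out) := by unfold Spec_wrapper_choc; infer_instance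

-- ===== CLAIM =====
def Claim_equal_wrapper_choc : Prop := ∀ (n : Int), Dom_wrapper_choc n → Spec_wrapper_choc n (wrapper_choc n)

-- ===== LEMMAS AND PROOFS =====
theorem wrapper_choc_closed (n : Int) :
    wrapper_choc n = if n < 3 then 0 else (2 * n - 3) / 3 := by
  rw [wrapper_choc]
  split_ifs with h1 h2
  · rfl
  · rw [PySem.Int.floordiv_eq_ediv_of_pos (by omega)]
    show n / 3 + wrapper_choc (n / 3) = _
    rw [wrapper_choc_closed, if_pos (by omega)]
    omega
  · rw [PySem.Int.floordiv_eq_ediv_of_pos (by omega), PySem.Int.mod_eq_emod_of_pos (by omega)]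
    show n / 5 * 2 + wrapper_choc (n / 5 * 2 + n % 5) = _
    rw [wrapper_choc_closed]
    split_ifs with h3
    · omega
    · omega
termination_by n.toNat
decreasing_by
  · omega
  · omega

-- ===== VERDICT =====
theorem wrapper_choc_spec : Claim_equal_wrapper_choc := by
  intro n _
  show wrapper_choc n = wrapper_choc_alt n
  rw [wrapper_choc_closed, wrapper_choc_alt]
  split_ifs with h
  · rfl
  · rw [PySem.Int.floordiv_eq_ediv_of_pos (by omega)]
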